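-- pv_equiv track=rewrite | github.com/AmyChengg/Browser-Engineering | layout-ch3.py | split_abbr
-- ===== SOURCE A (Python) =====
-- def split_abbr(word):
--     words = list()
--     if not word:
--         return words
--
--     is_lower = word[0].islower()
--     curr_word = ""
--     for char in word:
--         if (char.islower() and not is_lower) or (not char.islower() and is_lower):
--             words.append(curr_word)
--             curr_word = ""
--             is_lower = char.islower()
--         curr_word += char
--
--     if curr_word:
--         words.append(curr_word)
--
--     return words
-- ===== SOURCE B (Python) =====
-- def split_abbr(word):
--     # Two-pointer run slicing: find each maximal run of same-islower chars and slice it.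
--     out = []
--     i = 0
--     n = len(word)
--     while i < n:
--         k = word[i].islower()
--         j = i + 1
--         while j < n and word[j].islower() == k:
--             j += 1
--         out.append(word[i:j])
--         i = j
--     return out
-- ===== Notes on version B (the rewrite author's own statement) =====
-- stated objective: simpler
-- what changed: Replaced the flag/accumulator state machine (is_lower flag, curr_word string built char by char, trailing flush) with two-pointer run detection that slices each maximal same-islower run directly from the word.
import Mathlib
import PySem

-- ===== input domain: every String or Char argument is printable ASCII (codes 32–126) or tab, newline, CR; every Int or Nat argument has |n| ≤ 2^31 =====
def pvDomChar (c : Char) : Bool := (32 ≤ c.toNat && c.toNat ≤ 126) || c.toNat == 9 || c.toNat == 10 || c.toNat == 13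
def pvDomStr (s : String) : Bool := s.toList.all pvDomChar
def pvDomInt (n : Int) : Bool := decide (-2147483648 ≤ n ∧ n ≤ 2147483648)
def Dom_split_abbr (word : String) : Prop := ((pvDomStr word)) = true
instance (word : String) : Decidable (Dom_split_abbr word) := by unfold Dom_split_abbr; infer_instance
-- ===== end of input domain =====

-- B replaces A's flag/accumulator state machine with two-pointer maximal-run slicing (objective: simpler).

-- ===== PORT A =====
-- one loop step: the branch flushes curr_word and resets the flag; curr_word += char always follows
def splitAbbrStep (st : List (List Char) × Bool × List Char) (char : Char) :
    List (List Char) × Bool × List Char :=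
  let (words, is_lower, curr) := st
  if (PySem.Chars.islower char && !is_lower) || (!(PySem.Chars.islower char) && is_lower) then
    (words ++ [curr], PySem.Chars.islower char, [char])
  else
    (words, is_lower, curr ++ [char])

def split_abbr (word : String) : List String :=
  match word.toList with
  | [] => []
  | c0 :: _ =>
    let st := word.toList.foldl splitAbbrStep ([], PySem.Chars.islower c0, [])
    (if st.2.2 ≠ [] then st.1 ++ [st.2.2] else st.1).map String.ofList

-- ===== PORT B =====
-- outer while: peel one maximal run; inner while = takeWhile/dropWhile on the same predicate
def splitAbbrRuns : List Char → List (List Char)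
  | [] => []
  | c :: cs =>
    (c :: cs.takeWhile (fun d => PySem.Chars.islower d == PySem.Chars.islower c)) ::
      splitAbbrRuns (cs.dropWhile (fun d => PySem.Chars.islower d == PySem.Chars.islower c))
termination_by l => l.length
decreasing_by
  simpa using Nat.lt_succ_of_le (List.length_dropWhile_le _ _)

def split_abbr_alt (word : String) : List String :=
  (splitAbbrRuns word.toList).map String.ofList

-- ===== PRECONDITION & SPEC =====
def Spec_split_abbr (word : String) (out : List String) : Prop := out = split_abbr_alt word
instance (word : String) (out : List String) : Decidable (Spec_split_abbr word out) := by unfold Spec_split_abbr; infer_instance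

-- ===== CLAIM (what is proved, stated in full; the proofs are below) =====
def Claim_equal_split_abbr : Prop := ∀ (word : String), Dom_split_abbr word → Spec_split_abbr word (split_abbr word)

-- ===== LEMMAS AND PROOFS =====

theorem pv_takeWhile_append {α : Type} (p : α → Bool) (cs : List α) (x : α) (xs : List α)
    (h : ∀ d ∈ cs, p d = true) (hx : p x = false) : (cs ++ x :: xs).takeWhile p = cs := by
  induction cs with
  | nil => simp [hx]
  | cons d ds ih =>
    simp only [List.cons_append, List.takeWhile_cons, h d (by simp), if_true]
    rw [ih (fun e he => h e (by simp [he]))]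

theorem pv_dropWhile_append {α : Type} (p : α → Bool) (cs : List α) (x : α) (xs : List α)
    (h : ∀ d ∈ cs, p d = true) (hx : p x = false) : (cs ++ x :: xs).dropWhile p = x :: xs := by
  induction cs with
  | nil => simp [hx]
  | cons d ds ih =>
    simp only [List.cons_append, List.dropWhile_cons, h d (by simp), if_true]
    exact ih (fun e he => h e (by simp [he]))

-- the A-side loop, started on a nonempty homogeneous curr, produces words ++ runs (curr ++ l)
theorem splitAbbr_loop_runs (l : List Char) (words : List (List Char)) (flag : Bool)
    (curr : List Char) (hne : curr ≠ []) (hall : ∀ c ∈ curr, PySem.Chars.islower c = flag) :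
    (let st := l.foldl splitAbbrStep (words, flag, curr)
     if st.2.2 ≠ [] then st.1 ++ [st.2.2] else st.1) = words ++ splitAbbrRuns (curr ++ l) := by
  induction l generalizing words flag curr with
  | nil =>
    obtain ⟨c, cs, rfl⟩ := List.exists_cons_of_ne_nil hne
    have hc : PySem.Chars.islower c = flag := hall c (by simp)
    have htw : cs.takeWhile (fun d => PySem.Chars.islower d == PySem.Chars.islower c) = cs := by
      apply List.takeWhile_eq_self_iff.mpr
      intro d hd
      simp [hc, hall d (by simp [hd])]
    have hdw : cs.dropWhile (fun d => PySem.Chars.islower d == PySem.Chars.islower c) = [] := by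
      apply List.dropWhile_eq_nil_iff.mpr
      intro d hd
      simp [hc, hall d (by simp [hd])]
    rw [List.append_nil, splitAbbrRuns, htw, hdw]
    simp [splitAbbrRuns]
  | cons x xs ih =>
    by_cases hx : PySem.Chars.islower x = flag
    · have hstep : splitAbbrStep (words, flag, curr) x = (words, flag, curr ++ [x]) := by
        simp [splitAbbrStep, hx]
      have := ih words flag (curr ++ [x]) (by simp)
        (by intro c hc; rcases List.mem_append.mp hc with h | h
            · exact hall c h
            · simp at h; subst h; exact hx)
      simpa [List.foldl_cons, hstep, List.append_assoc] using this
    · have hstep : splitAbbrStep (words, flag, curr) x =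
          (words ++ [curr], PySem.Chars.islower x, [x]) := by
        cases hfl : flag <;> cases hil : PySem.Chars.islower x <;>
          simp_all [splitAbbrStep]
      have hsplit : splitAbbrRuns (curr ++ x :: xs) = curr :: splitAbbrRuns (x :: xs) := by
        obtain ⟨c, cs, rfl⟩ := List.exists_cons_of_ne_nil hne
        have hc : PySem.Chars.islower c = flag := hall c (by simp)
        have hp : ∀ d ∈ cs, (fun d => PySem.Chars.islower d == PySem.Chars.islower c) d = true := by
          intro d hd; simp [hc, hall d (by simp [hd])]
        have hpx : (fun d => PySem.Chars.islower d == PySem.Chars.islower c) x = false := by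
          simp [hc]; intro h; exact hx h
        rw [List.cons_append, splitAbbrRuns,
          pv_takeWhile_append _ cs x xs hp hpx, pv_dropWhile_append _ cs x xs hp hpx]
      have := ih (words ++ [curr]) (PySem.Chars.islower x) [x] (by simp)
        (by intro c hc; simp at hc; subst hc; rfl)
      simp only [List.foldl_cons, hstep] at *
      rw [this, hsplit]
      simp


-- ===== VERDICT (by name: the statement is the Claim_ definition above) =====
theorem split_abbr_spec : Claim_equal_split_abbr := by
  intro word _
  unfold Spec_split_abbr split_abbr split_abbr_alt
  cases h : word.toList with
  | nil => simp [splitAbbrRuns]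
  | cons c0 rest =>
    have hstep : splitAbbrStep ([], PySem.Chars.islower c0, []) c0 =
        ([], PySem.Chars.islower c0, [c0]) := by
      cases hil : PySem.Chars.islower c0 <;> simp [splitAbbrStep, hil]
    have := splitAbbr_loop_runs rest [] (PySem.Chars.islower c0) [c0] (by simp)
      (by intro c hc; simp at hc; subst hc; rfl)
    simp only [h, List.foldl_cons, hstep] at *
    simp [this]
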